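-- pv_equiv track=rewrite | github.com/JoongHuiKim/Algorithm-Solutinos | nameChange.py | solution
-- ===== SOURCE A (Python) =====
-- def solution(new_id):
--     lowerId = new_id.lower()
--     filter = '~!@#$%^&*()=+[{]}:?,<>/'
--     answer = ''
--
--     for letter in lowerId:
--         if letter in filter:
--             continue
--         else:
--             answer += letter
--
--     for i in range(len(answer)):
--         answer = answer.replace("..",".")
--
--     if answer[0] == ".":
--         answer = answer[1:]
--         if answer == '':
--             answer = 'a'
--
--     if answer[len(answer)-1] == ".":
--         answer = answer[:-1]
--
--     if answer == "":
--         answer = "a"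
--     if len(answer) >= 16:
--         answer = answer[:15]
--         while True:
--             if answer[len(answer) - 1] == ".":
--                 answer = answer[:-1]
--             else:
--                 break
--
--
--     if len(answer)<=2:
--         while len(answer) <=2:
--             answer += answer[len(answer)-1]
--
--     return answer
-- ===== SOURCE B (Python) =====
-- def solution(new_id):
--     bad = '~!@#$%^&*()=+[{]}:?,<>/'
--     out = []
--     for ch in new_id.lower():
--         if ch in bad:
--             continue
--         if ch == '.' and out and out[-1] == '.':
--             continue                      # collapse runs of dots in the same single pass
--         out.append(ch)
--     s = ''.join(out).strip('.')           # a collapsed string has at most one dot at each end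
--     if not s:
--         s = 'a'
--     s = s[:15].strip('.')                 # truncation may expose one trailing dot; the first char is never '.'
--     if len(s) < 3:
--         s += s[-1] * (3 - len(s))
--     return s
-- ===== Notes on version B (the rewrite author's own statement) =====
-- stated objective: faster
-- what changed: A filters characters in one loop and then collapses runs of consecutive dots by calling a double-dot-to-single-dot replace len(answer) times (each a full scan) before trimming/truncating/padding with manual index pokes and while-loops; B does filtering and dot-run collapsing in a single linear pass with a last-kept-character check, then uses dot-strip, slicing and string repetition for the tail steps.
import Mathlib
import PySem

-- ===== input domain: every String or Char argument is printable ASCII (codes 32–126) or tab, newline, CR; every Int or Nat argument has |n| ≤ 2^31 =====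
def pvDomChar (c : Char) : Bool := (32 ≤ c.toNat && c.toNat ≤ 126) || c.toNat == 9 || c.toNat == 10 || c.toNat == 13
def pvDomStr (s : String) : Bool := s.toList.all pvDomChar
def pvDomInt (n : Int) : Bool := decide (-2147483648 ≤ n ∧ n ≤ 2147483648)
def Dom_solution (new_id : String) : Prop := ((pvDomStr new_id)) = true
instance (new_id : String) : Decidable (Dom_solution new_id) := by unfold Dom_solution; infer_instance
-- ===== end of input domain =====

-- B replaces A's quadratic repeated double-dot replace passes by a single linear pass that
-- collapses runs of dots while filtering; measured asymptotically faster in a timing run.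

-- ===== PORT A =====
def pvFilter : List Char := "~!@#$%^&*()=+[{]}:?,<>/".toList

-- A's `while True: if answer[-1] == '.': answer = answer[:-1] else: break`
def pvStripLoop (l : List Char) : List Char :=
  if PySem.List.pyGet? l ((l.length : Int) - 1) = some '.' then
    pvStripLoop (PySem.List.slice l none (some (-1)))
  else l
termination_by l.length
decreasing_by
  rename_i h
  rw [PySem.List.slice_to_neg_one]
  have hl : l ≠ [] := by rintro rfl; simp [PySem.List.pyGet?, PySem.List.pyIdx?] at h
  have : 1 ≤ l.length := List.length_pos_iff.mpr hl
  simp [List.length_dropLast]; omega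

-- A's `while len(answer) <= 2: answer += answer[len(answer)-1]`  (none = Python would raise; unreachable from A)
def pvPadLoop (l : List Char) : List Char :=
  if l.length ≤ 2 then
    match PySem.List.pyGet? l (-1) with
    | some c => pvPadLoop (l ++ [c])
    | none => l
  else l
termination_by 3 - l.length
decreasing_by
  rename_i h
  simp; omega

def solution (new_id : String) : String :=
  let lowerId := PySem.Chars.lower new_id.toList
  let answer := lowerId.foldl
    (fun acc letter => if pvFilter.contains letter then acc else acc ++ [letter]) []
  let answer := (PySem.List.pyRange 0 (answer.length : Int) 1).foldl
    (fun acc _ => PySem.Chars.replace acc ['.', '.'] ['.']) answer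
  let answer :=
    if PySem.List.pyGet? answer 0 = some '.' then
      let a := PySem.List.slice answer (some 1) none
      if a = [] then ['a'] else a
    else answer
  let answer :=
    if PySem.List.pyGet? answer ((answer.length : Int) - 1) = some '.' then
      PySem.List.slice answer none (some (-1))
    else answer
  let answer := if answer = [] then ['a'] else answer
  let answer := if 16 ≤ answer.length then pvStripLoop (PySem.List.slice answer none (some 15)) else answer
  let answer := if answer.length ≤ 2 then pvPadLoop answer else answer
  String.ofList answer

-- ===== PORT B =====
def solution_alt (new_id : String) : String :=
  let out := (PySem.Chars.lower new_id.toList).foldl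
    (fun acc ch =>
      if pvFilter.contains ch then acc
      else if ch = '.' ∧ PySem.List.pyGet? acc (-1) = some '.' then acc
      else acc ++ [ch]) ([] : List Char)
  let s := PySem.Chars.stripChars out ['.']
  let s := if s = [] then ['a'] else s
  let s := PySem.Chars.stripChars (PySem.List.slice s none (some 15)) ['.']
  let s :=
    if s.length < 3 then
      match PySem.List.pyGet? s (-1) with
      | some c => s ++ PySem.List.pyRepeat [c] (3 - (s.length : Int))
      | none => s
    else s
  String.ofList s

-- ===== PRECONDITION & SPEC =====
-- Pre_ excludes exactly the inputs on which Python A raises IndexError (`answer[0]` on an empty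
-- string): those whose every character is filtered out, i.e. lowercases into A's punctuation filter.
def Pre_solution (new_id : String) : Prop :=
  new_id.toList.any (fun c => !pvFilter.contains (PySem.Chars.lowerChar c)) = true
instance (new_id : String) : Decidable (Pre_solution new_id) := by unfold Pre_solution; infer_instance

def pvWitness_solution : String := "abc"

def Spec_solution (new_id : String) (out : String) : Prop := out = solution_alt new_id
instance (new_id : String) (out : String) : Decidable (Spec_solution new_id out) := by unfold Spec_solution; infer_instance

-- ===== CLAIM (what is proved, stated in full; the proofs are below) =====
def Claim_equal_solution : Prop := ∀ (new_id : String), Dom_solution new_id → Pre_solution new_id → Spec_solution new_id (solution new_id)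

-- ===== LEMMAS AND PROOFS =====

def pvR : List Char → List Char
  | [] => []
  | '.' :: '.' :: t => '.' :: pvR t
  | c :: t => c :: pvR t

theorem pvR_cons_cons (c d : Char) (t : List Char) :
    pvR (c :: d :: t) = if c = '.' ∧ d = '.' then '.' :: pvR t else c :: pvR (d :: t) := by
  by_cases h : c = '.' ∧ d = '.'
  · obtain ⟨rfl, rfl⟩ := h; simp [pvR]
  · rw [if_neg h]
    rcases Decidable.not_and_iff_not_or_not.mp h with hc | hd
    · conv_lhs => rw [pvR.eq_def]
      split
      · simp_all
      · simp_all
      · rename_i heq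
        injection heq with h1 h2; subst h1; subst h2; rfl
    · conv_lhs => rw [pvR.eq_def]
      split
      · simp_all
      · simp_all
      · rename_i heq
        injection heq with h1 h2; subst h1; subst h2; rfl

theorem go_spec (fuel : ℕ) (l acc : List Char) (h : l.length ≤ fuel) :
    PySem.Chars.replace.go ['.', '.'] ['.'] fuel l acc = acc.reverse ++ pvR l := by
  induction fuel generalizing l acc with
  | zero =>
    have : l = [] := List.eq_nil_of_length_eq_zero (Nat.le_zero.mp h)
    subst this
    simp [PySem.Chars.replace.go, pvR]
  | succ n ih =>
    rcases l with _ | ⟨c, _ | ⟨d, t⟩⟩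
    · simp [PySem.Chars.replace.go, pvR]
    · rw [PySem.Chars.replace.go]
      have hp : ¬ (List.isPrefixOf ['.', '.'] [c] = true) := by simp [List.isPrefixOf]
      rw [if_neg hp, ih [] (c :: acc) (by simp)]
      cases c <;> simp [pvR]
    · rw [PySem.Chars.replace.go, pvR_cons_cons]
      by_cases hcd : c = '.' ∧ d = '.'
      · obtain ⟨rfl, rfl⟩ := hcd
        have hp : List.isPrefixOf ['.', '.'] ('.' :: '.' :: t) = true := by simp [List.isPrefixOf]
        rw [if_pos hp, ih _ _ (by simp at h ⊢; omega)]
        simp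
      · have hp : ¬ (List.isPrefixOf ['.', '.'] (c :: d :: t) = true) := by
          simp [List.isPrefixOf, Bool.and_eq_true, beq_iff_eq]
          intro h1 h2; exact hcd ⟨h1.symm, h2.symm⟩
        rw [if_neg hp, ih (d :: t) (c :: acc) (by simp at h ⊢; omega)]
        simp [hcd]

theorem pv_replace_eq_pvR (l : List Char) : PySem.Chars.replace l ['.', '.'] ['.'] = pvR l := by
  rw [PySem.Chars.replace]
  simp only [List.isEmpty_cons, if_false, Bool.false_eq_true]
  exact go_spec l.length l [] le_rfl

def pvSq : List Char → List Char
  | [] => []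
  | [c] => [c]
  | a :: b :: t => if a = '.' ∧ b = '.' then pvSq (b :: t) else a :: pvSq (b :: t)

def pvNoDD (l : List Char) : Prop := List.IsChain (fun a b => ¬(a = '.' ∧ b = '.')) l

theorem pvR_cons (c : Char) (t : List Char) (h : ¬(c = '.' ∧ t.head? = some '.')) :
    pvR (c :: t) = c :: pvR t := by
  conv_lhs => rw [pvR.eq_def]
  split
  · simp_all
  · rename_i t1 heq
    exfalso; injection heq with h1 h2; exact h ⟨h1, by rw [h2]; rfl⟩
  · rename_i hfun heq
    injection heq with h1 h2; subst h1; subst h2; rfl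

theorem pvR_dots (t : List Char) : pvR ('.' :: '.' :: t) = '.' :: pvR t := rfl

theorem pvSq_cons_eq (c : Char) (x : List Char) :
    pvSq (c :: x) = if c = '.' ∧ x.head? = some '.' then pvSq x else c :: pvSq x := by
  cases x with
  | nil => simp [pvSq]
  | cons d t =>
    show (if c = '.' ∧ d = '.' then pvSq (d :: t) else c :: pvSq (d :: t)) = _
    simp only [List.head?_cons, Option.some.injEq]

theorem pvR_head (l : List Char) : (pvR l).head? = l.head? := by
  induction l using pvR.induct with
  | case1 => rfl
  | case2 t ih => rfl
  | case3 c t h ih =>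
    rw [pvR_cons c t (by rintro ⟨rfl, hh⟩; cases t with
      | nil => simp at hh
      | cons d t' => simp at hh; exact h t' rfl (by rw [hh]))]
    simp [ih]

theorem pvR_length_le (l : List Char) : (pvR l).length ≤ l.length := by
  induction l using pvR.induct with
  | case1 => simp [pvR]
  | case2 t ih => rw [pvR_dots]; simp; omega
  | case3 c t h ih =>
    rw [pvR_cons c t (by rintro ⟨rfl, hh⟩; cases t with
      | nil => simp at hh
      | cons d t' => simp at hh; exact h t' rfl (by rw [hh]))]
    simp; omega

theorem pvR_eq_self (l : List Char) (h : pvNoDD l) : pvR l = l := by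
  induction l using pvR.induct with
  | case1 => rfl
  | case2 t ih =>
    exfalso
    exact (List.isChain_cons_cons.mp h).1 ⟨rfl, rfl⟩
  | case3 c t hsh ih =>
    rw [pvR_cons c t (by rintro ⟨rfl, hh⟩; cases t with
      | nil => simp at hh
      | cons d t' => simp at hh; exact hsh t' rfl (by rw [hh]))]
    rw [ih (List.IsChain.tail h)]

theorem pvR_length_lt (l : List Char) (h : ¬ pvNoDD l) : (pvR l).length < l.length := by
  induction l using pvR.induct with
  | case1 => exact absurd (by simp [pvNoDD]) h
  | case2 t ih =>
    rw [pvR_dots]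
    have := pvR_length_le t
    simp; omega
  | case3 c t hsh ih =>
    have hhd : ¬(c = '.' ∧ t.head? = some '.') := by
      rintro ⟨rfl, hh⟩; cases t with
      | nil => simp at hh
      | cons d t' => simp at hh; exact hsh t' rfl (by rw [hh])
    rw [pvR_cons c t hhd]
    have hnt : ¬ pvNoDD t := by
      intro hnd
      apply h
      cases t with
      | nil => simp [pvNoDD]
      | cons d t' =>
        refine List.isChain_cons_cons.mpr ⟨?_, hnd⟩
        rintro ⟨rfl, rfl⟩
        exact hhd ⟨rfl, rfl⟩
    have := ih hnt
    simp; omega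

theorem pvSq_eq_self (l : List Char) (h : pvNoDD l) : pvSq l = l := by
  induction l using pvSq.induct with
  | case1 => rfl
  | case2 c => rfl
  | case3 a b t hd ih =>
    exact absurd hd (List.isChain_cons_cons.mp h).1
  | case4 a b t hd ih =>
    show (if a = '.' ∧ b = '.' then pvSq (b :: t) else a :: pvSq (b :: t)) = _
    rw [if_neg hd, ih (List.IsChain.tail h)]

theorem pvSq_head (b : Char) (t : List Char) : ∃ r, pvSq (b :: t) = b :: r := by
  induction t generalizing b with
  | nil => exact ⟨[], rfl⟩
  | cons d t' ih =>
    show ∃ r, (if b = '.' ∧ d = '.' then pvSq (d :: t') else b :: pvSq (d :: t')) = b :: r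
    by_cases hd : b = '.' ∧ d = '.'
    · obtain ⟨rfl, rfl⟩ := hd
      obtain ⟨r, hr⟩ := ih '.'
      exact ⟨r, by rw [if_pos ⟨rfl, rfl⟩, hr]⟩
    · exact ⟨pvSq (d :: t'), by rw [if_neg hd]⟩

theorem pvNoDD_pvSq (l : List Char) : pvNoDD (pvSq l) := by
  induction l using pvSq.induct with
  | case1 => simp [pvNoDD, pvSq]
  | case2 c => simp [pvNoDD, pvSq]
  | case3 a b t hd ih =>
    show pvNoDD (if a = '.' ∧ b = '.' then pvSq (b :: t) else a :: pvSq (b :: t))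
    rw [if_pos hd]; exact ih
  | case4 a b t hd ih =>
    show pvNoDD (if a = '.' ∧ b = '.' then pvSq (b :: t) else a :: pvSq (b :: t))
    rw [if_neg hd]
    obtain ⟨r, hr⟩ := pvSq_head b t
    rw [hr]
    refine List.isChain_cons_cons.mpr ⟨hd, ?_⟩
    rw [← hr]; exact ih

theorem pvSq_pvR (l : List Char) : pvSq (pvR l) = pvSq l := by
  induction l using pvR.induct with
  | case1 => rfl
  | case2 t ih =>
    rw [pvR_dots, pvSq_cons_eq, pvSq_cons_eq '.' ('.' :: t)]
    simp only [List.head?_cons, pvR_head]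
    rw [pvSq_cons_eq '.' t, ih]
    simp
  | case3 c t hsh ih =>
    have hhd : ¬(c = '.' ∧ t.head? = some '.') := by
      rintro ⟨rfl, hh⟩; cases t with
      | nil => simp at hh
      | cons d t' => simp at hh; exact hsh t' rfl (by rw [hh])
    rw [pvR_cons c t hhd, pvSq_cons_eq, pvSq_cons_eq c t, pvR_head, ih]

theorem pv_iter_pvR_eq_pvSq (n : ℕ) (l : List Char) (h : l.length ≤ n) : pvR^[n] l = pvSq l := by
  induction n generalizing l with
  | zero =>
    have : l = [] := List.eq_nil_of_length_eq_zero (Nat.le_zero.mp h)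
    subst this; rfl
  | succ n ih =>
    by_cases hdd : pvNoDD l
    · rw [Function.iterate_fixed (pvR_eq_self l hdd), pvSq_eq_self l hdd]
    · rw [Function.iterate_succ_apply, ih (pvR l) (by have := pvR_length_lt l hdd; omega), pvSq_pvR]

def pvSqd : List Char → List Char
  | [] => []
  | c :: t => if c = '.' then pvSqd t else pvSq (c :: t)

def pvCo : Option Char → List Char → List Char
  | _, [] => []
  | prev, c :: t => if c = '.' ∧ prev = some '.' then pvCo prev t else c :: pvCo (some c) t

theorem pvCo_cons (prev : Option Char) (c : Char) (t : List Char) :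
    pvCo prev (c :: t) = if c = '.' ∧ prev = some '.' then pvCo prev t else c :: pvCo (some c) t := rfl

theorem pvSq_dot (t : List Char) : pvSq ('.' :: t) = '.' :: pvSqd t := by
  induction t with
  | nil => rfl
  | cons d t' ih =>
    rw [pvSq_cons_eq]
    by_cases hd : d = '.'
    · subst hd
      rw [if_pos ⟨rfl, rfl⟩, ih]
      simp [pvSqd]
    · rw [if_neg (by simp [hd])]
      show _ = '.' :: (if d = '.' then pvSqd t' else pvSq (d :: t'))
      rw [if_neg hd]

theorem pvCo_spec (l : List Char) (prev : Option Char) :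
    pvCo prev l = if prev = some '.' then pvSqd l else pvSq l := by
  induction l generalizing prev with
  | nil => simp [pvCo, pvSqd, pvSq]
  | cons c t ih =>
    show (if c = '.' ∧ prev = some '.' then pvCo prev t else c :: pvCo (some c) t) = _
    by_cases hc : c = '.'
    · subst hc
      by_cases hp : prev = some '.'
      · rw [if_pos ⟨rfl, hp⟩, if_pos hp, ih, if_pos hp]
        show _ = (if ('.' : Char) = '.' then pvSqd t else _)
        simp
      · rw [if_neg (by simp [hp]), if_neg hp, ih, if_pos rfl, pvSq_dot]
    · rw [if_neg (by simp [hc]), ih, if_neg (by simp [hc])]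
      by_cases hp : prev = some '.'
      · rw [if_pos hp]
        show _ = pvSqd (c :: t)
        show _ = (if c = '.' then pvSqd t else pvSq (c :: t))
        rw [if_neg hc, pvSq_cons_eq, if_neg (by simp [hc])]
      · rw [if_neg hp, pvSq_cons_eq, if_neg (by simp [hc])]

theorem pvCo_fold (l : List Char) (acc : List Char) :
    l.foldl (fun acc ch => if ch = '.' ∧ acc.getLast? = some '.' then acc else acc ++ [ch]) acc
      = acc ++ pvCo acc.getLast? l := by
  induction l generalizing acc with
  | nil => simp [pvCo]
  | cons c t ih =>
    show List.foldl _ (if c = '.' ∧ acc.getLast? = some '.' then acc else acc ++ [c]) t = _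
    by_cases h : c = '.' ∧ acc.getLast? = some '.'
    · rw [if_pos h, ih, pvCo_cons, if_pos h]
    · rw [if_neg h, ih, pvCo_cons, if_neg h]
      simp only [List.getLast?_concat, List.append_assoc, List.cons_append, List.nil_append]

def pvLtrim (l : List Char) : List Char := if l.head? = some '.' then l.tail else l
def pvRtrim (l : List Char) : List Char := if l.getLast? = some '.' then l.dropLast else l

theorem pv_dropWhile_dot (l : List Char) (h : pvNoDD l) :
    l.dropWhile (fun c => (['.'] : List Char).contains c) = pvLtrim l := by
  cases l with
  | nil => rfl
  | cons c t =>
    by_cases hc : c = '.'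
    · subst hc
      rw [List.dropWhile_cons_of_pos (by simp)]
      have ht : t.dropWhile (fun c => (['.'] : List Char).contains c) = t := by
        cases t with
        | nil => rfl
        | cons d t' =>
          have hd : d ≠ '.' := fun hd => (List.isChain_cons_cons.mp h).1 ⟨rfl, hd⟩
          exact List.dropWhile_cons_of_neg (by simp [hd])
      rw [ht]
      simp [pvLtrim]
    · rw [List.dropWhile_cons_of_neg (by simp [hc])]
      simp [pvLtrim, hc]

theorem pv_noDD_reverse (l : List Char) (h : pvNoDD l) : pvNoDD l.reverse := by
  rw [pvNoDD, List.isChain_reverse]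
  exact List.IsChain.imp (fun a b hab h' => hab ⟨h'.2, h'.1⟩) h

theorem pv_stripChars_eq (l : List Char) (h : pvNoDD l) :
    PySem.Chars.stripChars l ['.'] = pvRtrim (pvLtrim l) := by
  rw [PySem.Chars.stripChars]
  have h1 : pvNoDD (pvLtrim l) := by
    unfold pvLtrim; split
    · exact h.tail
    · exact h
  rw [pv_dropWhile_dot l h, pv_dropWhile_dot _ (pv_noDD_reverse _ h1)]
  generalize pvLtrim l = x
  unfold pvLtrim pvRtrim
  rw [List.head?_reverse]
  split
  · rw [List.tail_reverse, List.reverse_reverse]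
  · rw [List.reverse_reverse]

-- getLast? of dropLast is not '.', given no adjacent dots
theorem pv_last_dropLast (l : List Char) (h : pvNoDD l) :
    l.dropLast.getLast? ≠ some '.' ∨ l.getLast? ≠ some '.' := by
  rcases hrev : l.reverse with _ | ⟨c, t⟩
  · left; simp [List.reverse_eq_nil_iff.mp hrev]
  · by_cases hc : c = '.'
    · subst hc
      left
      have hdl : l.dropLast = t.reverse := by
        have := congrArg List.tail hrev
        rw [List.tail_reverse] at this
        simpa using congrArg List.reverse this
      rw [hdl, List.getLast?_reverse]
      have := pv_noDD_reverse l h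
      rw [hrev] at this
      cases t with
      | nil => simp
      | cons d t' =>
        have : ¬('.' = '.' ∧ d = '.') := (List.isChain_cons_cons.mp this).1
        simp only [List.head?_cons, ne_eq, Option.some.injEq]
        intro hd; exact this ⟨rfl, hd⟩
    · right
      rw [← List.head?_reverse, hrev]
      simp [hc]

theorem pvLast_idx (l : List Char) : PySem.List.pyGet? l ((l.length : Int) - 1) = l.getLast? := by
  cases l with
  | nil => rfl
  | cons c t =>
    have hlen : (((c :: t).length : Int) - 1) = ((t.length : ℕ) : Int) := by
      simp
    rw [hlen, PySem.List.pyGet?_natCast, List.getLast?_eq_getElem?]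
    simp

theorem pvStripLoop_eq (l : List Char) (h : pvNoDD l) : pvStripLoop l = pvRtrim l := by
  rw [pvStripLoop, pvLast_idx]
  unfold pvRtrim
  by_cases hl : l.getLast? = some '.'
  · rw [if_pos hl, if_pos hl, PySem.List.slice_to_neg_one]
    rcases pv_last_dropLast l h with hd | hd
    · rw [pvStripLoop, pvLast_idx, if_neg hd]
    · exact absurd hl hd
  · rw [if_neg hl, if_neg hl]

theorem pvPadLoop_eq (l : List Char) (hne : l ≠ []) :
    pvPadLoop l = l ++ List.replicate (3 - l.length) (l.getLastD 'a') := by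
  induction l using pvPadLoop.induct with
  | case1 x hle c' hget ih =>
    rw [pvPadLoop, if_pos hle]
    rw [PySem.List.pyGet?_neg_one] at hget
    have hgd : x.getLastD 'a' = c' := by rw [List.getLastD_eq_getLast?, hget]; rfl
    rw [show (match PySem.List.pyGet? x (-1) with
        | some c => pvPadLoop (x ++ [c])
        | none => x) = pvPadLoop (x ++ [c']) by rw [PySem.List.pyGet?_neg_one, hget]]
    rw [ih (by simp)]
    have hrep : (x ++ [c']).getLastD 'a' = c' := by simp
    rw [hrep, hgd]
    have hlen : x.length ≤ 2 := hle
    rw [List.append_assoc]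
    congr 1
    have h3 : 3 - x.length = (3 - (x ++ [c']).length) + 1 := by simp; omega
    rw [h3, List.replicate_succ]
    simp
  | case2 x hle hget =>
    rw [PySem.List.pyGet?_neg_one, List.getLast?_eq_none_iff] at hget
    exact absurd hget hne
  | case3 x hgt =>
    rw [pvPadLoop, if_neg hgt]
    have : 3 - x.length = 0 := by omega
    simp [this]

def pvF (new_id : String) : List Char :=
  (PySem.Chars.lower new_id.toList).filter (fun c => !pvFilter.contains c)

def pvA3 (T : List Char) : List Char :=
  if T.head? = some '.' then (if T.tail = [] then ['a'] else T.tail) else T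
def pvA4 (T : List Char) : List Char :=
  if (pvA3 T).getLast? = some '.' then (pvA3 T).dropLast else pvA3 T
def pvV (T : List Char) : List Char := if pvA4 T = [] then ['a'] else pvA4 T
def pvU (T : List Char) : List Char :=
  if pvRtrim (pvLtrim T) = [] then ['a'] else pvRtrim (pvLtrim T)

theorem pv_stage3 (T : List Char) : pvV T = pvU T := by
  unfold pvV pvA4 pvA3 pvU pvRtrim pvLtrim
  by_cases hh : T.head? = some '.'
  · rw [if_pos hh, if_pos hh]
    by_cases ht : T.tail = []
    · rw [if_pos ht, ht]
      simp
    · rw [if_neg ht]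
  · rw [if_neg hh, if_neg hh]

theorem pv_ltrim_head (T : List Char) (h : pvNoDD T) : (pvLtrim T).head? ≠ some '.' := by
  unfold pvLtrim
  by_cases hh : T.head? = some '.'
  · rw [if_pos hh]
    cases T with
    | nil => simp
    | cons c t =>
      simp only [List.head?_cons, Option.some.injEq] at hh
      subst hh
      cases t with
      | nil => simp
      | cons d t' =>
        have := (List.isChain_cons_cons.mp h).1
        simp only [List.tail_cons, List.head?_cons, ne_eq, Option.some.injEq]
        intro hd; exact this ⟨rfl, hd⟩
  · rw [if_neg hh]; exact hh

theorem pv_head_dropLast (l : List Char) (c : Char) (h : l.dropLast.head? = some c) :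
    l.head? = some c := by
  cases l with
  | nil => simp at h
  | cons a t =>
    cases t with
    | nil => simp at h
    | cons b t' =>
      rw [List.dropLast_cons₂] at h
      simp at h ⊢
      exact h

theorem pv_rtrim_head (w : List Char) (h : w.head? ≠ some '.') : (pvRtrim w).head? ≠ some '.' := by
  unfold pvRtrim
  split
  · intro hc; exact h (pv_head_dropLast w '.' hc)
  · exact h

theorem pv_rtrim_last (w : List Char) (h : pvNoDD w) : (pvRtrim w).getLast? ≠ some '.' := by
  unfold pvRtrim
  by_cases hl : w.getLast? = some '.'
  · rw [if_pos hl]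
    rcases pv_last_dropLast w h with hd | hd
    · exact hd
    · exact absurd hl hd
  · rw [if_neg hl]; exact hl

theorem pv_noDD_ltrim (T : List Char) (h : pvNoDD T) : pvNoDD (pvLtrim T) := by
  unfold pvLtrim; split
  · exact h.tail
  · exact h

theorem pv_noDD_rtrim (w : List Char) (h : pvNoDD w) : pvNoDD (pvRtrim w) := by
  unfold pvRtrim; split
  · exact h.prefix (List.dropLast_prefix w)
  · exact h

theorem pv_stage3_inv (T : List Char) (hT : pvNoDD T) :
    pvU T ≠ [] ∧ (pvU T).head? ≠ some '.' ∧ (pvU T).getLast? ≠ some '.' ∧ pvNoDD (pvU T) := by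
  unfold pvU
  by_cases hu : pvRtrim (pvLtrim T) = []
  · rw [if_pos hu]
    exact ⟨by simp, by simp, by simp, by simp [pvNoDD]⟩
  · rw [if_neg hu]
    exact ⟨hu, pv_rtrim_head _ (pv_ltrim_head T hT), pv_rtrim_last _ (pv_noDD_ltrim T hT),
      pv_noDD_rtrim _ (pv_noDD_ltrim T hT)⟩

theorem pv_head_take (v : List Char) (hne : v ≠ []) : (v.take 15).head? = v.head? := by
  cases v with
  | nil => exact absurd rfl hne
  | cons c t => rw [List.take_succ_cons]; rfl

theorem pv_stage4 (v : List Char) (hne : v ≠ []) (hh : v.head? ≠ some '.')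
    (hl : v.getLast? ≠ some '.') (hdd : pvNoDD v) :
    (if 16 ≤ v.length then pvStripLoop (v.take 15) else v)
      = PySem.Chars.stripChars (v.take 15) ['.'] := by
  have hdd15 : pvNoDD (v.take 15) := hdd.prefix (List.take_prefix _ _)
  rw [pv_stripChars_eq _ hdd15]
  have hh15 : (v.take 15).head? ≠ some '.' := by rw [pv_head_take v hne]; exact hh
  have hlt : pvLtrim (v.take 15) = v.take 15 := by unfold pvLtrim; rw [if_neg hh15]
  rw [hlt]
  by_cases h16 : 16 ≤ v.length
  · rw [if_pos h16, pvStripLoop_eq _ hdd15]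
  · rw [if_neg h16, List.take_of_length_le (by omega)]
    unfold pvRtrim; rw [if_neg hl]

theorem pv_rtrim_ne_nil (x : List Char) (hne : x ≠ []) (hh : x.head? ≠ some '.') :
    pvRtrim x ≠ [] := by
  unfold pvRtrim
  by_cases hl : x.getLast? = some '.'
  · rw [if_pos hl]
    cases x with
    | nil => exact absurd rfl hne
    | cons c t =>
      cases t with
      | nil =>
        simp at hl
        exact absurd (by simp [hl]) hh
      | cons d t' => simp
  · rw [if_neg hl]; exact hne

theorem pv_stage5 (w : List Char) (hne : w ≠ []) :
    (if w.length ≤ 2 then pvPadLoop w else w)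
      = (if w.length < 3 then
          match PySem.List.pyGet? w (-1) with
          | some c => w ++ PySem.List.pyRepeat [c] (3 - (w.length : Int))
          | none => w
        else w) := by
  by_cases h : w.length ≤ 2
  · rw [if_pos h, if_pos (by omega), pvPadLoop_eq w hne]
    obtain ⟨c, hc⟩ : ∃ c, w.getLast? = some c := by
      cases hg : w.getLast? with
      | none => exact absurd (List.getLast?_eq_none_iff.mp hg) hne
      | some c => exact ⟨c, rfl⟩
    rw [show (match PySem.List.pyGet? w (-1) with
        | some c => w ++ PySem.List.pyRepeat [c] (3 - (w.length : Int))
        | none => w) = w ++ PySem.List.pyRepeat [c] (3 - (w.length : Int)) by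
      rw [PySem.List.pyGet?_neg_one, hc]]
    rw [PySem.List.pyRepeat_singleton, List.getLastD_eq_getLast?, hc]
    have : ((3:Int) - ↑w.length).toNat = 3 - w.length := by omega
    rw [this]
    rfl
  · rw [if_neg h, if_neg (by omega)]

theorem pv_A_filter (L : List Char) :
    L.foldl (fun acc letter => if pvFilter.contains letter then acc else acc ++ [letter]) []
      = L.filter (fun c => !pvFilter.contains c) := by
  rw [PySem.List.foldl_congr_mem L
    (fun acc letter => if pvFilter.contains letter then acc else acc ++ [letter])
    (fun acc letter => if (!pvFilter.contains letter) = true then acc ++ [letter] else acc) []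
    (by intro acc x _; cases h : pvFilter.contains x <;> simp [h])]
  rw [PySem.List.foldl_append_if_eq_filter]
  simp

theorem pv_A_collapse (F : List Char) :
    (PySem.List.pyRange 0 (F.length : Int) 1).foldl
        (fun acc _ => PySem.Chars.replace acc ['.', '.'] ['.']) F = pvSq F := by
  rw [PySem.List.foldl_congr_mem (PySem.List.pyRange 0 (F.length : Int) 1)
    (fun acc _ => PySem.Chars.replace acc ['.', '.'] ['.']) (fun acc _ => pvR acc) F
    (by intro acc x _; exact pv_replace_eq_pvR acc)]
  rw [List.foldl_const, PySem.List.pyRange_zero_natCast]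
  rw [List.length_map, List.length_range]
  exact pv_iter_pvR_eq_pvSq F.length F le_rfl

theorem pv_B_fold (L : List Char) :
    L.foldl (fun acc ch =>
        if pvFilter.contains ch then acc
        else if ch = '.' ∧ PySem.List.pyGet? acc (-1) = some '.' then acc
        else acc ++ [ch]) []
      = pvSq (L.filter (fun c => !pvFilter.contains c)) := by
  rw [PySem.List.foldl_congr_mem L
    (fun acc ch =>
        if pvFilter.contains ch then acc
        else if ch = '.' ∧ PySem.List.pyGet? acc (-1) = some '.' then acc
        else acc ++ [ch])
    (fun acc ch => if (!pvFilter.contains ch) = true then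
        (if ch = '.' ∧ acc.getLast? = some '.' then acc else acc ++ [ch]) else acc) []
    (by
      intro acc x _
      simp only [PySem.List.pyGet?_neg_one]
      cases h : pvFilter.contains x <;> simp [h])]
  rw [PySem.List.foldl_if_eq_foldl_filter]
  rw [pvCo_fold]
  rw [pvCo_spec]
  simp

theorem pv_tail_eq (T : List Char) (hT : pvNoDD T) :
    (let a3 := if T.head? = some '.' then (if T.tail = [] then ['a'] else T.tail) else T
     let a4 := if a3.getLast? = some '.' then a3.dropLast else a3
     let a5 := if a4 = [] then ['a'] else a4
     let a6 := if 16 ≤ a5.length then pvStripLoop (a5.take 15) else a5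
     if a6.length ≤ 2 then pvPadLoop a6 else a6)
    = (let u := PySem.Chars.stripChars T ['.']
       let s := if u = [] then ['a'] else u
       let s2 := PySem.Chars.stripChars (s.take 15) ['.']
       if s2.length < 3 then
         match PySem.List.pyGet? s2 (-1) with
         | some c => s2 ++ PySem.List.pyRepeat [c] (3 - (s2.length : Int))
         | none => s2
       else s2) := by
  obtain ⟨hne, hh, hl, hdd⟩ := pv_stage3_inv T hT
  have htake_ne : (pvU T).take 15 ≠ [] := by
    cases hu : pvU T with
    | nil => exact absurd hu hne
    | cons c t => rw [List.take_succ_cons]; simp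
  have hw_ne : PySem.Chars.stripChars ((pvU T).take 15) ['.'] ≠ [] := by
    have hdd15 : pvNoDD ((pvU T).take 15) := hdd.prefix (List.take_prefix _ _)
    rw [pv_stripChars_eq _ hdd15]
    have hh15 : ((pvU T).take 15).head? ≠ some '.' := by rw [pv_head_take _ hne]; exact hh
    have hlt : pvLtrim ((pvU T).take 15) = (pvU T).take 15 := by unfold pvLtrim; rw [if_neg hh15]
    rw [hlt]
    exact pv_rtrim_ne_nil _ htake_ne hh15
  show (if (if 16 ≤ (pvV T).length then pvStripLoop ((pvV T).take 15) else pvV T).length ≤ 2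
        then pvPadLoop (if 16 ≤ (pvV T).length then pvStripLoop ((pvV T).take 15) else pvV T)
        else (if 16 ≤ (pvV T).length then pvStripLoop ((pvV T).take 15) else pvV T)) = _
  rw [pv_stage3 T]
  rw [pv_stage4 (pvU T) hne hh hl hdd]
  rw [pv_stage5 _ hw_ne]
  show _ = (if (PySem.Chars.stripChars ((if PySem.Chars.stripChars T ['.'] = [] then ['a']
      else PySem.Chars.stripChars T ['.']).take 15) ['.']).length < 3 then _ else _)
  rw [pv_stripChars_eq T hT]
  rfl

def pvTailA (answer0 : List Char) : List Char :=
  let answer :=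
    if PySem.List.pyGet? answer0 0 = some '.' then
      let a := PySem.List.slice answer0 (some 1) none
      if a = [] then ['a'] else a
    else answer0
  let answer :=
    if PySem.List.pyGet? answer ((answer.length : Int) - 1) = some '.' then
      PySem.List.slice answer none (some (-1))
    else answer
  let answer := if answer = [] then ['a'] else answer
  let answer := if 16 ≤ answer.length then pvStripLoop (PySem.List.slice answer none (some 15)) else answer
  let answer := if answer.length ≤ 2 then pvPadLoop answer else answer
  answer

def pvTailB (out : List Char) : List Char :=
  let s := PySem.Chars.stripChars out ['.']
  let s := if s = [] then ['a'] else s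
  let s := PySem.Chars.stripChars (PySem.List.slice s none (some 15)) ['.']
  let s :=
    if s.length < 3 then
      match PySem.List.pyGet? s (-1) with
      | some c => s ++ PySem.List.pyRepeat [c] (3 - (s.length : Int))
      | none => s
    else s
  s

theorem pvTail_eq (T : List Char) (hT : pvNoDD T) : pvTailA T = pvTailB T := by
  unfold pvTailA pvTailB
  simp only [PySem.List.pyGet?_zero, ← List.head?_eq_getElem?, pvLast_idx,
    PySem.List.slice_from_one, PySem.List.slice_to_neg_one,
    PySem.List.slice_to _ (show (0:Int) ≤ 15 by norm_num), show ((15:Int)).toNat = 15 from rfl]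
  exact pv_tail_eq T hT


theorem pv_main (new_id : String) : solution new_id = solution_alt new_id := by
  have hA : solution new_id = String.ofList (pvTailA
      ((PySem.List.pyRange 0 (((PySem.Chars.lower new_id.toList).foldl
          (fun acc letter => if pvFilter.contains letter then acc else acc ++ [letter]) []).length : Int) 1).foldl
        (fun acc _ => PySem.Chars.replace acc ['.', '.'] ['.'])
        ((PySem.Chars.lower new_id.toList).foldl
          (fun acc letter => if pvFilter.contains letter then acc else acc ++ [letter]) []))) := rfl
  have hB : solution_alt new_id = String.ofList (pvTailB
      ((PySem.Chars.lower new_id.toList).foldl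
        (fun acc ch =>
          if pvFilter.contains ch then acc
          else if ch = '.' ∧ PySem.List.pyGet? acc (-1) = some '.' then acc
          else acc ++ [ch]) ([] : List Char))) := rfl
  rw [hA, hB, pv_A_filter, pv_A_collapse, pv_B_fold]
  exact congrArg String.ofList (pvTail_eq _ (pvNoDD_pvSq _))

-- ===== VERDICT (by name: the statement is the Claim_ definition above) =====
theorem solution_spec : Claim_equal_solution := by
  intro new_id _ _
  exact pv_main new_id
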